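-- pv_equiv track=rewrite | github.com/anthon-sd/rookify | backend/services/enhanced_memory_service.py | _extract_tactical_focus
-- ===== SOURCE A (Python) =====
-- from typing import Dict, List, Optional, Any, Tuple
--
-- def _extract_tactical_focus(vector_insights: Dict) -> str:
--     """Extract main tactical focus area from insights"""
--     tactical_strengths = vector_insights.get('tactical_strengths', {})
--
--     if not tactical_strengths:
--         return 'general_tactics'
--
--     # Find area needing most work
--     needs_work = [
--         tactic for tactic, data in tactical_strengths.items()
--         if data.get('strength_level') == 'needs_work'
--     ]
--
--     if needs_work:
--         return needs_work[0]
--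
--     # If nothing needs work, focus on developing areas
--     developing = [
--         tactic for tactic, data in tactical_strengths.items()
--         if data.get('strength_level') == 'developing'
--     ]
--
--     return developing[0] if developing else 'advanced_tactics'
-- ===== SOURCE B (Python) =====
-- def _extract_tactical_focus(vector_insights):
--     """Extract main tactical focus area from insights (single pass)."""
--     tactical_strengths = vector_insights.get('tactical_strengths', {})
--
--     if not tactical_strengths:
--         return 'general_tactics'
--
--     first_developing = None
--     for tactic, data in tactical_strengths.items():
--         level = data.get('strength_level')
--         if level == 'needs_work':
--             return tactic
--         if first_developing is None and level == 'developing':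
--             first_developing = tactic
--
--     return first_developing if first_developing is not None else 'advanced_tactics'
-- ===== Notes on version B (the rewrite author's own statement) =====
-- stated objective: simpler
-- what changed: Replaces the two list-building filter passes over tactical_strengths with a single loop that returns immediately at the first 'needs_work' tactic while remembering the first 'developing' one.
import Mathlib
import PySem

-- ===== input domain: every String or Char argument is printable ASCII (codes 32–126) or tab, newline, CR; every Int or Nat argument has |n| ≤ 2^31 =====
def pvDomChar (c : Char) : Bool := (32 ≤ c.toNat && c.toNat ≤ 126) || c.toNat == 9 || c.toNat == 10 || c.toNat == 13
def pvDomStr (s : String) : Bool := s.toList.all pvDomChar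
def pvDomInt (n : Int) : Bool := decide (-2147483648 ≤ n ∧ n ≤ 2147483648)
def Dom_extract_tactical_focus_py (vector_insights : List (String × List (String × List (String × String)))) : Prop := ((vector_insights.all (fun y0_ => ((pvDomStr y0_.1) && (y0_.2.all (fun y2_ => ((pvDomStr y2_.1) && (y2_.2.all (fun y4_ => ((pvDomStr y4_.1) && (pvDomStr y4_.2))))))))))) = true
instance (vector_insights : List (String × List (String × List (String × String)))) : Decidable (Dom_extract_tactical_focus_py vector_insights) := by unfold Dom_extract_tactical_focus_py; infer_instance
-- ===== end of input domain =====

-- B replaces A's two filter passes by one early-exit loop tracking the first 'developing' tactic (objective: simpler).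

-- ===== PORT A =====
-- dict.get on an association list: first match (shared by both ports, as both Pythons call .get)
def alGet {ν : Type} (l : List (String × ν)) (k : String) : Option ν :=
  match l with
  | [] => none
  | (k', v) :: rest => if k' == k then some v else alGet rest k

def extract_tactical_focus_py (vector_insights : List (String × List (String × List (String × String)))) : String :=
  let tactical_strengths := (alGet vector_insights "tactical_strengths").getD []
  if tactical_strengths.isEmpty then "general_tactics"
  else
    let needs_work := (tactical_strengths.filter
      (fun td => alGet td.2 "strength_level" == some "needs_work")).map (·.1)
    match needs_work with
    | t :: _ => t
    | [] =>
      let developing := (tactical_strengths.filter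
        (fun td => alGet td.2 "strength_level" == some "developing")).map (·.1)
      match developing with
      | t :: _ => t
      | [] => "advanced_tactics"

-- ===== PORT B =====
def altLoop (ts : List (String × List (String × String))) (first_developing : Option String) : String :=
  match ts with
  | [] => first_developing.getD "advanced_tactics"
  | (tactic, data) :: rest =>
    let level := alGet data "strength_level"
    if level == some "needs_work" then tactic
    else altLoop rest
      (if first_developing.isNone && (level == some "developing") then some tactic
       else first_developing)

def extract_tactical_focus_py_alt (vector_insights : List (String × List (String × List (String × String)))) : String :=
  let tactical_strengths := (alGet vector_insights "tactical_strengths").getD []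
  if tactical_strengths.isEmpty then "general_tactics"
  else altLoop tactical_strengths none

-- ===== PRECONDITION & SPEC =====
def Spec_extract_tactical_focus_py (vector_insights : List (String × List (String × List (String × String)))) (out : String) : Prop := out = extract_tactical_focus_py_alt vector_insights
instance (vector_insights : List (String × List (String × List (String × String)))) (out : String) : Decidable (Spec_extract_tactical_focus_py vector_insights out) := by unfold Spec_extract_tactical_focus_py; infer_instance

-- ===== CLAIM (what is proved, stated in full; the proofs are below) =====
def Claim_equal_extract_tactical_focus_py : Prop := ∀ (vector_insights : List (String × List (String × List (String × String)))), Dom_extract_tactical_focus_py vector_insights → Spec_extract_tactical_focus_py vector_insights (extract_tactical_focus_py vector_insights)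

-- ===== LEMMAS AND PROOFS =====

-- The single loop equals: first needs_work tactic, else the accumulator, else first developing tactic, else the default.
theorem altLoop_eq (ts : List (String × List (String × String))) (fd : Option String) :
    altLoop ts fd =
      match (ts.filter (fun td => alGet td.2 "strength_level" == some "needs_work")).map (·.1) with
      | t :: _ => t
      | [] =>
        match fd with
        | some x => x
        | none =>
          match (ts.filter (fun td => alGet td.2 "strength_level" == some "developing")).map (·.1) with
          | t :: _ => t
          | [] => "advanced_tactics" := by
  induction ts generalizing fd with
  | nil => cases fd <;> simp [altLoop, Option.getD]
  | cons hd tl ih =>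
    obtain ⟨tactic, data⟩ := hd
    simp only [altLoop, ih]
    by_cases hnw : (alGet data "strength_level" == some "needs_work") = true
    · simp [List.filter, hnw]
    · simp only [List.filter, hnw, if_neg, Bool.not_eq_true] at *
      by_cases hdev : (alGet data "strength_level" == some "developing") = true
      · cases fd <;> simp [hdev, Option.isNone]
      · cases fd <;> simp [hdev, Option.isNone]

-- ===== VERDICT (by name: the statement is the Claim_ definition above) =====
theorem extract_tactical_focus_py_spec : Claim_equal_extract_tactical_focus_py := by
  intro vi _
  unfold Spec_extract_tactical_focus_py extract_tactical_focus_py extract_tactical_focus_py_alt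
  set ts := (alGet vi "tactical_strengths").getD [] with hts
  by_cases h : ts.isEmpty
  · simp [h]
  · simp only [h, if_neg, Bool.false_eq_true, not_false_eq_true, altLoop_eq]
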